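-- pv_equiv track=rewrite | github.com/DmitriyBuldyshkin/DynamicProgramming | Tabulation/grid_trav.py | grid_trav
-- ===== SOURCE A (Python) =====
-- def grid_trav(m, n):
--     """
--     O(m * n) time
--     O(m * n) space
--     """
--     table = [[0] * (n+1) for i in range(m+1)]
--     table[1][1] = 1
--     for i in range(m+1):
--         for j in range(n+1):
--             if i + 1 <= m:
--                 table[i+1][j] += table[i][j]
--             if j + 1 <= n:
--                 table[i][j+1] += table[i][j]
--
--     return table[m][n]
-- ===== SOURCE B (Python) =====
-- def grid_trav(m, n):
--     """
--     O(min(m, n)) time, O(1) space: the number of monotone paths across an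
--     m x n grid is the binomial coefficient C(m+n-2, min(m,n)-1), computed
--     by the exact multiplicative product.
--     """
--     if m < 1 or n < 1:
--         raise IndexError("grid dimensions must be at least 1")
--     k = min(m, n) - 1
--     N = m + n - 2
--     res = 1
--     for i in range(1, k + 1):
--         res = res * (N - k + i) // i
--     return res
-- ===== Notes on version B (the rewrite author's own statement) =====
-- stated objective: faster
-- what changed: Replaces the O(m*n) dynamic-programming table with the closed-form binomial coefficient C(m+n-2, min(m,n)-1) computed by a multiplicative product of min(m,n)-1 exact integer steps.
import Mathlib
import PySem

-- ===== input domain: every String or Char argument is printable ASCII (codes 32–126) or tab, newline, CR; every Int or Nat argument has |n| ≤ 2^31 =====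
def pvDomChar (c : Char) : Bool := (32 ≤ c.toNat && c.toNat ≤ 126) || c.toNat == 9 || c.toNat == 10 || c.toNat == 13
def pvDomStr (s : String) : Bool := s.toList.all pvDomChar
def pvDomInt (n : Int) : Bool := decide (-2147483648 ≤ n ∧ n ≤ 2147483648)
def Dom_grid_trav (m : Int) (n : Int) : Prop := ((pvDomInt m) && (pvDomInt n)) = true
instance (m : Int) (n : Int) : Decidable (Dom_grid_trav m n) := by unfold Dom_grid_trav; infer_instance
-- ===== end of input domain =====

-- B replaces A's O(m*n) dynamic-programming table by the closed-form binomial coefficient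
-- C(m+n-2, min(m,n)-1), computed as a short exact multiplicative product; like A, B raises on m < 1 or n < 1.

-- ===== PORT A =====
-- table[i][j] += v (Python lists are mutable arrays; indices the loops use are nonnegative)
def pvAdd2 (t : Array (Array Int)) (i j v : Int) : Array (Array Int) :=
  t.modify i.toNat (fun row =>
    let old := row.getD j.toNat 0
    row.setIfInBounds j.toNat (old + v))

def grid_trav (m : Int) (n : Int) : Int :=
  -- table = [[0] * (n+1) for i in range(m+1)]  (Python lists are arrays: Array models them;
  -- all indices the loops use are the nonnegative range values, read/written in place)
  let table : Array (Array Int) :=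
    ((PySem.List.pyRange 0 (m+1) 1).map (fun _ => Array.replicate (n+1).toNat (0 : Int))).toArray
  -- table[1][1] = 1  (exists only under Pre_; out of range Python raises IndexError)
  let table := table.modify 1 (fun row => row.setIfInBounds 1 1)
  let table :=
    (PySem.List.pyRange 0 (m+1) 1).foldl (fun tb i =>
      (PySem.List.pyRange 0 (n+1) 1).foldl (fun tb j =>
        let tb := if i + 1 ≤ m then
            pvAdd2 tb (i+1) j ((tb.getD i.toNat #[]).getD j.toNat 0) else tb
        if j + 1 ≤ n then
            pvAdd2 tb i (j+1) ((tb.getD i.toNat #[]).getD j.toNat 0) else tb) tb) table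
  (table.getD m.toNat #[]).getD n.toNat 0

-- ===== PORT B =====
def grid_trav_alt (m : Int) (n : Int) : Int :=
  -- "if m < 1 or n < 1: raise IndexError" — B raises here, like A; outside Pre_, 0 is a dummy value
  if m < 1 ∨ n < 1 then 0
  else
    let k := min m n - 1
    let N := m + n - 2
    (PySem.List.pyRange 1 (k+1) 1).foldl (fun res i => PySem.Int.floordiv (res * (N - k + i)) i) 1

-- ===== PRECONDITION & SPEC =====
-- A indexes table[1][1], which exists only when m ≥ 1 and n ≥ 1; on every other input both A and B raise IndexError.
def Pre_grid_trav (m : Int) (n : Int) : Prop := 1 ≤ m ∧ 1 ≤ n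
instance (m : Int) (n : Int) : Decidable (Pre_grid_trav m n) := by unfold Pre_grid_trav; infer_instance
def pvWitness_grid_trav : Int × Int := (2, 3)

def Spec_grid_trav (m : Int) (n : Int) (out : Int) : Prop := out = grid_trav_alt m n
instance (m : Int) (n : Int) (out : Int) : Decidable (Spec_grid_trav m n out) := by unfold Spec_grid_trav; infer_instance

-- ===== CLAIM (what is proved, stated in full; the proofs are below) =====
def Claim_equal_grid_trav : Prop := ∀ (m : Int) (n : Int), Dom_grid_trav m n → Pre_grid_trav m n → Spec_grid_trav m n (grid_trav m n)

-- ===== LEMMAS AND PROOFS =====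
def pvF : Nat → Nat → Int
  | 0, _ => 0
  | _+1, 0 => 0
  | a+1, b+1 => (if a = 0 ∧ b = 0 then 1 else 0) + pvF a (b+1) + pvF (a+1) b

theorem pvF_zero_left (b : Nat) : pvF 0 b = 0 := by cases b <;> simp [pvF]
theorem pvF_zero_right (a : Nat) : pvF a 0 = 0 := by cases a <;> simp [pvF]

theorem pvF_succ (a b : Nat) : pvF (a+1) (b+1) = (if a = 0 ∧ b = 0 then 1 else 0) + pvF a (b+1) + pvF (a+1) b := by
  simp [pvF]

theorem pvF_choose (a b : Nat) : pvF (a+1) (b+1) = (Nat.choose (a+b) a : Int) := by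
  induction a generalizing b with
  | zero =>
    induction b with
    | zero => simp [pvF]
    | succ b ihb => rw [pvF_succ, pvF_zero_left, ihb]; simp
  | succ a iha =>
    induction b with
    | zero => rw [pvF_succ, pvF_zero_right, iha 0]; simp
    | succ b ihb =>
      rw [pvF_succ, iha (b+1), ihb]
      have : (a+1+(b+1)).choose (a+1) = (a+(b+1)).choose a + (a+1+b).choose (a+1) := by
        rw [show a+1+(b+1) = (a+1+b)+1 by omega, Nat.choose_succ_succ' (a+1+b) a]
        congr 2
        omega
      simp [this]

def pvSeed (a b : Nat) : Int := if a = 1 ∧ b = 1 then 1 else 0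

def pvS (i j a b : Nat) : Int :=
  pvSeed a b
  + (match a with | 0 => 0 | a'+1 => if a' < i ∨ (a' = i ∧ b < j) then pvF a' b else 0)
  + (match b with | 0 => 0 | b'+1 => if a < i ∨ (a = i ∧ b' < j) then pvF a b' else 0)

def pvCur (t : Array (Array Int)) (a b : Nat) : Int := (t.getD a #[]).getD b 0

def pvShape (t : Array (Array Int)) (M N : Nat) : Prop :=
  t.size = M + 1 ∧ ∀ a, a < M + 1 → (t.getD a #[]).size = N + 1

theorem pvS_self (i j : Nat) : pvS i j i j = pvF i j := by
  cases i with
  | zero => cases j with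
    | zero => simp [pvS, pvSeed, pvF]
    | succ j => simp [pvS, pvSeed, pvF_zero_left]
  | succ a => cases j with
    | zero => simp [pvS, pvSeed, pvF_zero_right]
    | succ b =>
      rw [show pvF (a+1) (b+1) = (if a = 0 ∧ b = 0 then 1 else 0) + pvF a (b+1) + pvF (a+1) b by simp [pvF]]
      simp [pvS, pvSeed]

theorem pvRowMem {t : Array (Array Int)} {M N : Nat} (hS : pvShape t M N) (a : Nat) (ha : a ≤ M) :
    (t.getD a #[]).size = N + 1 := hS.2 a (by omega)

theorem pvCur_add {t : Array (Array Int)} {M N : Nat} (hS : pvShape t M N)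
    (a b : Nat) (ha : a ≤ M) (hb : b ≤ N) (v : Int) (a' b' : Nat) :
    pvCur (pvAdd2 t (a : Int) (b : Int) v) a' b'
      = if a' = a ∧ b' = b then pvCur t a b + v else pvCur t a' b' := by
  have haL : a < t.size := by rw [hS.1]; omega
  have hsz : b < t[a].size := by
    have := pvRowMem hS a ha
    rw [Array.getD_eq_getD_getElem?, Array.getElem?_eq_getElem haL] at this
    simp only [Option.getD_some] at this
    omega
  simp only [pvAdd2, Int.toNat_natCast, pvCur, Array.getD_eq_getD_getElem?,
    Array.getElem?_modify, Array.getElem?_setIfInBounds]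
  by_cases hAA : a = a' <;> by_cases hBB : b = b'
  · subst hAA; subst hBB
    simp [Array.getElem?_eq_getElem haL, hsz, Array.getD_eq_getD_getElem?]
  · subst hAA
    simp only [Array.getElem?_eq_getElem haL, Option.map_some, Option.getD_some, ite_true,
      true_and, Array.getElem?_setIfInBounds]
    rw [if_neg hBB, if_neg (fun h : b' = b => hBB h.symm)]
  · subst hBB
    rw [if_neg hAA, if_neg (fun h : a' = a ∧ b = b => hAA h.1.symm)]
  · rw [if_neg hAA, if_neg (fun h : a' = a ∧ b' = b => hAA h.1.symm)]

theorem pvShape_add {t : Array (Array Int)} {M N : Nat} (hS : pvShape t M N)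
    (a b : Nat) (ha : a ≤ M) (v : Int) :
    pvShape (pvAdd2 t (a : Int) (b : Int) v) M N := by
  obtain ⟨hlen, hrows⟩ := hS
  simp only [pvAdd2, Int.toNat_natCast]
  refine ⟨by simp [hlen], ?_⟩
  intro a' ha'
  simp only [Array.getD_eq_getD_getElem?, Array.getElem?_modify]
  by_cases hAA : a = a'
  · subst hAA
    have haL : a < t.size := by omega
    rw [Array.getElem?_eq_getElem haL]
    simp only [Option.map_some, Option.getD_some, Array.size_setIfInBounds]
    have := hrows a ha'
    rw [Array.getD_eq_getD_getElem?, Array.getElem?_eq_getElem haL] at this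
    simpa using this
  · rw [if_neg hAA]
    have := hrows a' ha'
    rwa [Array.getD_eq_getD_getElem?] at this

theorem pvS_step (M N i j a b : Nat) (ha : a ≤ M) (hb : b ≤ N) :
    pvS i (j+1) a b
      = pvS i j a b + (if a = i+1 ∧ b = j ∧ i+1 ≤ M then pvF i j else 0)
        + (if a = i ∧ b = j+1 ∧ j+1 ≤ N then pvF i j else 0) := by
  cases a <;> cases b <;>
    simp only [pvS, pvSeed] <;>
    split_ifs <;>
    (first | ring1 | (exfalso; omega) | (exfalso; simp_all; done) | (simp_all <;> (first | ring1 | omega | (exfalso; omega))))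

theorem pvS_zero (a b : Nat) : pvS 0 0 a b = pvSeed a b := by
  cases a <;> cases b <;> simp [pvS]

theorem pvS_rowend (M N i a b : Nat) (hb : b ≤ N) :
    pvS i (N+1) a b = pvS (i+1) 0 a b := by
  cases a <;> cases b <;>
    simp only [pvS, pvSeed] <;>
    split_ifs <;>
    (first | ring1 | (exfalso; omega) | (exfalso; simp_all; done) | (simp_all <;> (first | ring1 | omega | (exfalso; omega))))

theorem pvS_final (M N : Nat) (hM : 1 ≤ M) (hN : 1 ≤ N) : pvS (M+1) 0 M N = pvF M N := by
  obtain ⟨M', rfl⟩ : ∃ M', M = M' + 1 := ⟨M - 1, by omega⟩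
  obtain ⟨N', rfl⟩ : ∃ N', N = N' + 1 := ⟨N - 1, by omega⟩
  rw [show pvF (M'+1) (N'+1) = (if M' = 0 ∧ N' = 0 then 1 else 0) + pvF M' (N'+1) + pvF (M'+1) N' by simp [pvF]]
  simp only [pvS, pvSeed]
  split_ifs <;>
    (first | ring1 | (exfalso; omega) | (exfalso; simp_all; done) | (simp_all <;> (first | ring1 | omega | (exfalso; omega))))

def pvBodyN (M N i : Nat) (tb : Array (Array Int)) (j : Nat) : Array (Array Int) :=
  let tb' := if (i:Int) + 1 ≤ (M:Int) then
      pvAdd2 tb ((i:Int)+1) (j:Int) ((tb.getD (i:Int).toNat #[]).getD (j:Int).toNat 0) else tb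
  if (j:Int) + 1 ≤ (N:Int) then
      pvAdd2 tb' (i:Int) ((j:Int)+1) ((tb'.getD (i:Int).toNat #[]).getD (j:Int).toNat 0) else tb'

theorem pyGetD_cur (t : Array (Array Int)) (a b : Nat) :
    (t.getD ((a:Int)).toNat #[]).getD ((b:Int)).toNat 0 = pvCur t a b := by
  simp [pvCur]

theorem pvBodyN_step {M N : Nat} {t : Array (Array Int)} (i j : Nat) (hi : i ≤ M) (hj : j ≤ N)
    (hS : pvShape t M N) (hInv : ∀ a b, a ≤ M → b ≤ N → pvCur t a b = pvS i j a b) :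
    pvShape (pvBodyN M N i t j) M N ∧
      ∀ a b, a ≤ M → b ≤ N → pvCur (pvBodyN M N i t j) a b = pvS i (j+1) a b := by
  have hv : pvCur t i j = pvF i j := by rw [hInv i j hi hj, pvS_self]
  unfold pvBodyN
  rw [show ((i:Int)+1) = ((i+1 : Nat) : Int) by push_cast; ring,
      show ((j:Int)+1) = ((j+1 : Nat) : Int) by push_cast; ring]
  by_cases h1 : ((i+1 : Nat) : Int) ≤ (M:Int)
  · have h1' : i + 1 ≤ M := by exact_mod_cast h1
    rw [if_pos h1]
    set t1 := pvAdd2 t ((i+1 : Nat):Int) ((j:Nat):Int) ((t.getD (i:Int).toNat #[]).getD (j:Int).toNat 0) with ht1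
    have hget : (t.getD (i:Int).toNat #[]).getD (j:Int).toNat 0 = pvF i j := by
      rw [pyGetD_cur, hv]
    have hS1 : pvShape t1 M N := by rw [ht1]; exact pvShape_add hS (i+1) j h1' _
    have hc1 : ∀ a b, pvCur t1 a b = if a = i+1 ∧ b = j then pvCur t (i+1) j + pvF i j else pvCur t a b := by
      intro a b; rw [ht1, hget]; exact pvCur_add hS (i+1) j h1' hj _ a b
    by_cases h2 : ((j+1 : Nat) : Int) ≤ (N:Int)
    · have h2' : j + 1 ≤ N := by exact_mod_cast h2
      rw [if_pos h2]
      have hget1 : (t1.getD (i:Int).toNat #[]).getD (j:Int).toNat 0 = pvF i j := by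
        rw [pyGetD_cur, hc1, if_neg (by omega), hv]
      rw [hget1]
      refine ⟨pvShape_add hS1 i (j+1) hi _, ?_⟩
      intro a b ha hb
      rw [pvCur_add hS1 i (j+1) hi h2' _ a b, pvS_step M N i j a b ha hb]
      simp only [hc1]
      rw [hInv (i+1) j h1' hj, hInv i (j+1) hi h2']
      try rw [hInv a b ha hb]
      split_ifs <;> (first | ring1 | (exfalso; omega) | (exfalso; simp_all; done) | (simp_all <;> (first | ring1 | omega | (exfalso; omega))))
    · have h2' : ¬ (j + 1 ≤ N) := by intro h; exact h2 (by exact_mod_cast h)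
      rw [if_neg h2]
      refine ⟨hS1, ?_⟩
      intro a b ha hb
      rw [pvS_step M N i j a b ha hb]
      simp only [hc1]
      rw [hInv (i+1) j h1' hj]
      try rw [hInv a b ha hb]
      split_ifs <;> (first | ring1 | (exfalso; omega) | (exfalso; simp_all; done) | (simp_all <;> (first | ring1 | omega | (exfalso; omega))))
  · have h1' : ¬ (i + 1 ≤ M) := by intro h; exact h1 (by exact_mod_cast h)
    rw [if_neg h1]
    by_cases h2 : ((j+1 : Nat) : Int) ≤ (N:Int)
    · have h2' : j + 1 ≤ N := by exact_mod_cast h2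
      rw [if_pos h2, pyGetD_cur, hv]
      refine ⟨pvShape_add hS i (j+1) hi _, ?_⟩
      intro a b ha hb
      rw [pvCur_add hS i (j+1) hi h2' _ a b, pvS_step M N i j a b ha hb]
      rw [hInv i (j+1) hi h2']
      try rw [hInv a b ha hb]
      split_ifs <;> (first | ring1 | (exfalso; omega) | (exfalso; simp_all; done) | (simp_all <;> (first | ring1 | omega | (exfalso; omega))))
    · have h2' : ¬ (j + 1 ≤ N) := by intro h; exact h2 (by exact_mod_cast h)
      rw [if_neg h2]
      refine ⟨hS, ?_⟩
      intro a b ha hb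
      rw [hInv a b ha hb, pvS_step M N i j a b ha hb,
          if_neg (by omega), if_neg (by omega)]
      ring

theorem pvInner_fold {M N : Nat} (i : Nat) (hi : i ≤ M) :
    ∀ (J : Nat), J ≤ N+1 → ∀ t, pvShape t M N →
      (∀ a b, a ≤ M → b ≤ N → pvCur t a b = pvS i 0 a b) →
      pvShape ((List.range J).foldl (pvBodyN M N i) t) M N ∧
      ∀ a b, a ≤ M → b ≤ N → pvCur ((List.range J).foldl (pvBodyN M N i) t) a b = pvS i J a b := by
  intro J
  induction J with
  | zero => intro _ t hS hI; simpa using ⟨hS, hI⟩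
  | succ J ih =>
    intro hJ t hS hI
    rw [List.range_succ, List.foldl_append]
    obtain ⟨hS', hI'⟩ := ih (by omega) t hS hI
    simpa using pvBodyN_step i J hi (by omega) hS' hI'

theorem pvOuter_fold {M N : Nat} :
    ∀ (I : Nat), I ≤ M+1 → ∀ t, pvShape t M N →
      (∀ a b, a ≤ M → b ≤ N → pvCur t a b = pvS 0 0 a b) →
      pvShape ((List.range I).foldl (fun tb i => (List.range (N+1)).foldl (pvBodyN M N i) tb) t) M N ∧
      ∀ a b, a ≤ M → b ≤ N →
        pvCur ((List.range I).foldl (fun tb i => (List.range (N+1)).foldl (pvBodyN M N i) tb) t) a b = pvS I 0 a b := by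
  intro I
  induction I with
  | zero => intro _ t hS hI; simpa using ⟨hS, hI⟩
  | succ I ih =>
    intro hI t hS hInv
    rw [show List.range (I+1) = List.range I ++ [I] from List.range_succ, List.foldl_append]
    obtain ⟨hS', hI'⟩ := ih (by omega) t hS hInv
    have := pvInner_fold (M := M) (N := N) I (by omega) (N+1) (by omega) _ hS' hI'
    refine ⟨by simpa using this.1, ?_⟩
    intro a b ha hb
    have h2 := this.2 a b ha hb
    simpa [pvS_rowend M N I a b hb] using h2

theorem pvCur_t0 (M N : Nat) (a b : Nat) :
    pvCur (((List.range (M+1)).map (fun _ => Array.replicate (N+1) (0:Int))).toArray) a b = 0 := by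
  simp only [pvCur, Array.getD_eq_getD_getElem?, List.getElem?_toArray]
  rcases Nat.lt_or_ge a (M+1) with h | h
  · rw [List.getElem?_map, List.getElem?_range h]
    simp [Array.getElem?_replicate]
    split_ifs <;> rfl
  · rw [List.getElem?_map, show (List.range (M+1))[a]? = none by rw [List.getElem?_eq_none] <;> simp <;> omega]
    rfl

theorem pvShape_t0 (M N : Nat) :
    pvShape (((List.range (M+1)).map (fun _ => Array.replicate (N+1) (0:Int))).toArray) M N := by
  constructor
  · simp
  · intro a ha
    simp only [Array.getD_eq_getD_getElem?, List.getElem?_toArray]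
    rw [List.getElem?_map, List.getElem?_range ha]
    simp

theorem pvInit_inv (M N : Nat) (hM : 1 ≤ M) (hN : 1 ≤ N) :
    pvShape ((((List.range (M+1)).map (fun _ => Array.replicate (N+1) (0:Int))).toArray).modify 1
      (fun row => row.setIfInBounds 1 1)) M N ∧
    ∀ a b, a ≤ M → b ≤ N →
      pvCur ((((List.range (M+1)).map (fun _ => Array.replicate (N+1) (0:Int))).toArray).modify 1
        (fun row => row.setIfInBounds 1 1)) a b = pvS 0 0 a b := by
  set t0 := ((List.range (M+1)).map (fun _ => Array.replicate (N+1) (0:Int))).toArray with ht0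
  have hS0 : pvShape t0 M N := pvShape_t0 M N
  have hrow1 : t0[1]? = some (Array.replicate (N+1) (0:Int)) := by
    rw [ht0, List.getElem?_toArray, List.getElem?_map, List.getElem?_range (by omega)]
    rfl
  constructor
  · refine ⟨by simp [Array.size_modify, hS0.1], ?_⟩
    intro a ha
    simp only [Array.getD_eq_getD_getElem?, Array.getElem?_modify]
    by_cases h1 : 1 = a
    · subst h1
      rw [hrow1]
      simp
    · rw [if_neg h1]
      have := hS0.2 a ha
      rwa [Array.getD_eq_getD_getElem?] at this
  · intro a b ha hb
    rw [pvS_zero]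
    simp only [pvCur, Array.getD_eq_getD_getElem?, Array.getElem?_modify]
    unfold pvSeed
    by_cases h1 : 1 = a
    · subst h1
      rw [hrow1]
      simp only [Option.map_some, Option.getD_some, Array.getElem?_setIfInBounds]
      by_cases h2 : 1 = b
      · subst h2
        simp [show (1:Nat) < N+1 by omega]
      · simp [h2, fun h : 1 = 1 ∧ b = 1 => h2 h.2.symm, Array.getElem?_replicate]
        split_ifs <;> first | rfl | (exfalso; omega)
    · rw [if_neg h1, if_neg (by omega)]
      have := pvCur_t0 M N a b
      rw [ht0]
      simpa [pvCur, Array.getD_eq_getD_getElem?] using this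

theorem grid_trav_eq_pvF (M N : Nat) (hM : 1 ≤ M) (hN : 1 ≤ N) :
    grid_trav (M:Int) (N:Int) = pvF M N := by
  have hM1 : ((M:Int)+1) = ((M+1:Nat):Int) := by push_cast; ring
  have hN1 : ((N:Int)+1) = ((N+1:Nat):Int) := by push_cast; ring
  simp only [grid_trav, hM1, hN1, PySem.List.pyRange_zero_nat, List.foldl_map, List.map_map,
    Int.toNat_natCast, Function.comp_def]
  obtain ⟨hS1, hI1⟩ := pvInit_inv M N hM hN
  have hmain := (pvOuter_fold (M := M) (N := N) (M+1) (le_refl _) _ hS1 hI1).2 M N (le_refl _) (le_refl _)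
  rw [pvS_final M N hM hN] at hmain
  exact hmain

theorem grid_trav_A_eq_choose (m n : Int) (hm : 1 ≤ m) (hn : 1 ≤ n) :
    grid_trav m n = ((m.toNat - 1 + (n.toNat - 1)).choose (m.toNat - 1) : Int) := by
  obtain ⟨M', hM'⟩ : ∃ M', m.toNat = M'+1 := ⟨m.toNat - 1, by omega⟩
  obtain ⟨N', hN'⟩ : ∃ N', n.toNat = N'+1 := ⟨n.toNat - 1, by omega⟩
  have h1 : m = (((M'+1 : Nat)) : Int) := by omega
  have h2 : n = (((N'+1 : Nat)) : Int) := by omega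
  rw [h1, h2, grid_trav_eq_pvF _ _ (by omega) (by omega), pvF_choose]
  simp

theorem pvBfold (c : Nat) : ∀ K : Nat,
    (PySem.List.pyRange 1 ((K:Int)+1) 1).foldl
      (fun res i => PySem.Int.floordiv (res * ((c:Int) + i)) i) 1
      = (Nat.choose (c+K) K : Int) := by
  intro K
  induction K with
  | zero =>
    rw [show ((0:Nat):Int)+1 = 1 by norm_num, PySem.List.pyRange_one_eq_nil (le_refl 1)]
    simp
  | succ K ih =>
    rw [show ((K+1:Nat):Int)+1 = ((K:Int)+1)+1 by push_cast; ring,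
        PySem.List.pyRange_one_succ_right (by omega : (1:Int) ≤ (K:Int)+1),
        List.foldl_append, ih]
    simp only [List.foldl]
    rw [show (c:Int) + ((K:Int)+1) = ((c+K+1 : Nat):Int) by push_cast; ring,
        show ((K:Int)+1) = ((K+1:Nat):Int) by push_cast; ring,
        show ((Nat.choose (c+K) K : Nat):Int) * ((c+K+1:Nat):Int)
            = (((Nat.choose (c+K) K) * (c+K+1) : Nat) : Int) by push_cast; ring,
        PySem.Int.floordiv_natCast]
    have h := Nat.succ_mul_choose_eq (c+K) K
    have h2 : (Nat.choose (c+K) K) * (c+K+1) = Nat.choose (c+K+1) (K+1) * (K+1) := by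
      rw [Nat.mul_comm]
      simpa using h
    rw [h2, Nat.mul_div_cancel _ (by omega : 0 < K+1)]
    norm_cast

theorem grid_trav_B_eq_choose (m n : Int) (hm : 1 ≤ m) (hn : 1 ≤ n) :
    grid_trav_alt m n = ((m.toNat - 1 + (n.toNat - 1)).choose (min m.toNat n.toNat - 1) : Int) := by
  simp only [grid_trav_alt]
  rw [if_neg (by omega)]
  have h1 : min m n - 1 + 1 = ((min m.toNat n.toNat - 1 : Nat) : Int) + 1 := by omega
  have hf : (fun (res i : Int) => PySem.Int.floordiv (res * (m + n - 2 - (min m n - 1) + i)) i)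
      = (fun res i => PySem.Int.floordiv (res * (((max m.toNat n.toNat - 1 : Nat) : Int) + i)) i) := by
    funext res i
    rw [show m + n - 2 - (min m n - 1) = ((max m.toNat n.toNat - 1 : Nat) : Int) by omega]
  rw [h1, hf, pvBfold]
  congr 2
  omega

-- ===== VERDICT (by name: the statement is the Claim_ definition above) =====
theorem grid_trav_spec : Claim_equal_grid_trav := by
  intro m n _ hpre
  obtain ⟨hm0, hn0⟩ := hpre
  unfold Spec_grid_trav
  rw [grid_trav_A_eq_choose m n hm0 hn0, grid_trav_B_eq_choose m n hm0 hn0]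
  have hm : 1 ≤ m.toNat := by omega
  have hn : 1 ≤ n.toNat := by omega
  congr 1
  rcases Nat.le_total m.toNat n.toNat with h | h
  · rw [Nat.min_eq_left h]
  · rw [Nat.min_eq_right h]
    have h3 := Nat.choose_symm (show m.toNat - 1 ≤ m.toNat - 1 + (n.toNat - 1) by omega)
    rw [show m.toNat - 1 + (n.toNat - 1) - (m.toNat - 1) = n.toNat - 1 by omega] at h3
    exact h3.symm
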